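-- pv_equiv track=rewrite | github.com/prossel/MediaPipeTraining | object detection/split_coco_dataset.py | _image_primary_category
-- ===== SOURCE A (Python) =====
-- from collections import Counter, defaultdict
-- from typing import Dict, List, Tuple, Set
--
-- def _image_primary_category(
--     ann_by_image: Dict[int, List[Dict]],
-- ) -> Dict[int, int]:
--     """
--     For each image_id, return the category_id that appears most among its annotations.
--     If an image has no annotations, return -1.
--     """
--     result = {}
--     for img_id, anns in ann_by_image.items():
--         if not anns:
--             result[img_id] = -1
--             continue
--         cnt = Counter([a["category_id"] for a in anns if "category_id" in a])
--         if cnt: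
--             result[img_id] = cnt.most_common(1)[0][0]
--         else:
--             result[img_id] = -1
--     return result
-- ===== SOURCE B (Python) =====
-- def _image_primary_category(ann_by_image):
--     """
--     For each image_id, return the category_id that appears most among its annotations.
--     If an image has no annotations, return -1.
--     """
--     result = {}
--     for img_id, anns in ann_by_image.items():
--         cats = [a["category_id"] for a in anns if "category_id" in a]
--         best, best_n = -1, 0
--         for i, c in enumerate(cats):
--             if cats.index(c) == i:  # first occurrence: consider each category once
--                 n = cats.count(c)
--                 if n > best_n:
--                     best, best_n = c, n
--         result[img_id] = best
--     return result
-- ===== Notes on version B (the rewrite author's own statement) =====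
-- stated objective: alternative
-- what changed: Replaces the per-image Counter hash table and most_common sort with a table-free brute-force scan: each first occurrence (detected by cats.index(c) == i) has its frequency recomputed with cats.count(c), and a strictly-greater running argmax keeps the first-seen category among ties; -1 falls out of the 0-initialised scan, removing the separate empty branches.
import Mathlib
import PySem

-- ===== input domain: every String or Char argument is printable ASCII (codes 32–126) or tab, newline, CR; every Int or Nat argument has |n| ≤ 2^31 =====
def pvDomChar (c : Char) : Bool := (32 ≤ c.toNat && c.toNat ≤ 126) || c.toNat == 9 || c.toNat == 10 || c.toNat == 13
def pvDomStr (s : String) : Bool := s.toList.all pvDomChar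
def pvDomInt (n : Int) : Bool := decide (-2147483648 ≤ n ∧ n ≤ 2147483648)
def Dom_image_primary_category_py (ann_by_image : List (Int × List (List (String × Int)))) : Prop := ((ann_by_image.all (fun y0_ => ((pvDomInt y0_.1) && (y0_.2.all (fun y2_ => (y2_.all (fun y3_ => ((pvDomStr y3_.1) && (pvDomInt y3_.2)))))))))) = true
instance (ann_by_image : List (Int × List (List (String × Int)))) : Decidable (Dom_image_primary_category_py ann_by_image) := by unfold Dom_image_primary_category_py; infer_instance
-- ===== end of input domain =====

-- B replaces the per-image Counter hash table and the most_common sort with a table-free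
-- brute-force scan (list.index detects first occurrences, list.count recomputes frequencies,
-- a strictly-greater running argmax keeps the first-seen category among ties; objective: alternative).

-- shared accessor: a["category_id"] guarded by '"category_id" in a' (inner dict lookup)
def pvCat (a : List (String × Int)) : Option Int := (PySem.Dict.ofList a).get? "category_id"

-- ===== PORT A =====
def image_primary_category_py (ann_by_image : List (Int × List (List (String × Int)))) : List (Int × Int) :=
  (ann_by_image.foldl
    (fun (result : PySem.Dict Int Int) (p : Int × List (List (String × Int))) =>
      if p.2.isEmpty then result.insert p.1 (-1)
      else
        let cnt := PySem.Dict.counter (p.2.filterMap pvCat)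
        if cnt.items.isEmpty then result.insert p.1 (-1)
        else result.insert p.1 (((PySem.List.sorted cnt.items (fun kv => kv.2) true).headD (0, 0)).1))
    PySem.Dict.empty).items

-- ===== PORT B =====
def image_primary_category_py_alt (ann_by_image : List (Int × List (List (String × Int)))) : List (Int × Int) :=
  (ann_by_image.foldl
    (fun (result : PySem.Dict Int Int) (p : Int × List (List (String × Int))) =>
      let cats := p.2.filterMap pvCat
      let best := (PySem.List.enumerate cats 0).foldl
        (fun (b : Int × Int) (ic : Int × Int) =>
          if (PySem.List.index? cats ic.2).map (fun k => (k : Int)) == some ic.1 then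
            let n : Int := (PySem.List.count cats ic.2 : Int)
            if b.2 < n then (ic.2, n) else b
          else b)
        (-1, 0)
      result.insert p.1 best.1)
    PySem.Dict.empty).items

-- ===== PRECONDITION & SPEC =====
def Spec_image_primary_category_py (ann_by_image : List (Int × List (List (String × Int)))) (out : List (Int × Int)) : Prop := out = image_primary_category_py_alt ann_by_image
instance (ann_by_image : List (Int × List (List (String × Int)))) (out : List (Int × Int)) : Decidable (Spec_image_primary_category_py ann_by_image out) := by unfold Spec_image_primary_category_py; infer_instance

-- ===== CLAIM (what is proved, stated in full; the proofs are below) =====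
def Claim_equal_image_primary_category_py : Prop := ∀ (ann_by_image : List (Int × List (List (String × Int)))), Dom_image_primary_category_py ann_by_image → Spec_image_primary_category_py ann_by_image (image_primary_category_py ann_by_image)

-- ===== LEMMAS AND PROOFS =====

-- the strictly-greater argmax step both sides reduce to
def pvMax (b kv : Int × Int) : Int × Int := if b.2 < kv.2 then kv else b

-- B's inner step over enumerate(cats), with cats fixed
def pvStep (cats : List Int) (b : Int × Int) (ic : Int × Int) : Int × Int :=
  if (PySem.List.index? cats ic.2).map (fun k => (k : Int)) == some ic.1 then
    let n : Int := (PySem.List.count cats ic.2 : Int)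
    if b.2 < n then (ic.2, n) else b
  else b

-- folding Set.add only appends
theorem pv_foldl_add_prefix (xs : List Int) (s : PySem.Set Int) :
    ∃ r, xs.foldl PySem.Set.add s = s ++ r := by
  induction xs generalizing s with
  | nil => exact ⟨[], by simp⟩
  | cons x t ih =>
    simp only [List.foldl_cons]
    by_cases hx : x ∈ s
    · rw [PySem.Set.add_of_mem hx]; exact ih s
    · rw [PySem.Set.add_of_not_mem hx]
      obtain ⟨r, hr⟩ := ih (s ++ [x])
      exact ⟨[x] ++ r, by simp [hr]⟩

-- core: B's guarded scan over enumerate(cats) is the argmax fold over the distinct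
-- categories in first-occurrence order, paired with their counts
theorem pv_enum_fold (cats : List Int) (suf pre : List Int) (b : Int × Int)
    (hc : cats = pre ++ suf) :
    (PySem.List.enumerate suf (pre.length : Int)).foldl (pvStep cats) b
      = (((PySem.Set.ofList cats).drop (PySem.Set.ofList pre).length).map
          (fun k => (k, (cats.count k : Int)))).foldl pvMax b := by
  induction suf generalizing pre b with
  | nil =>
    have : PySem.Set.ofList cats = PySem.Set.ofList pre := by rw [hc]; simp
    simp [PySem.List.enumerate_nil, this]
  | cons c t ih =>
    rw [PySem.List.enumerate_cons, List.foldl_cons]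
    by_cases hcp : c ∈ pre
    · -- duplicate: guard false, and ofList (pre ++ [c]) = ofList pre
      have hidx : PySem.List.index? cats c = PySem.List.index? pre c := by
        rw [hc, PySem.List.index?_append_of_mem _ hcp]
      have hguard : pvStep cats b ((pre.length : Int), c) = b := by
        unfold pvStep
        obtain ⟨j, hj⟩ := Option.isSome_iff_exists.mp
          ((PySem.List.index?_isSome_iff pre c).mpr hcp)
        have hjlt : j < pre.length := by
          obtain ⟨p', s', hps, hlen, _⟩ := (PySem.List.index?_eq_some_iff pre c j).mp hj
          subst hps; simp [← hlen]
        simp only [hidx, hj]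
        have : ¬ ((j : Int) = (pre.length : Int)) := by exact_mod_cast Nat.ne_of_lt hjlt
        simp [this]
      have hpre' : cats = (pre ++ [c]) ++ t := by rw [hc, List.append_assoc]; rfl
      have hofl : PySem.Set.ofList (pre ++ [c]) = PySem.Set.ofList pre := by
        have hm : c ∈ PySem.Set.ofList pre := (PySem.Set.mem_ofList pre c).mpr hcp
        rw [PySem.Set.ofList_eq_foldl, List.foldl_append, ← PySem.Set.ofList_eq_foldl]
        exact PySem.Set.add_of_mem hm
      have hih := ih (pre ++ [c]) (b := b) hpre'
      rw [hofl] at hih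
      simp only [List.length_append, List.length_cons, List.length_nil] at hih
      push_cast at hih
      rw [hguard]
      exact hih
    · -- first occurrence: guard true, ofList grows by c
      have hidx : PySem.List.index? cats c = some pre.length := by
        rw [hc, show pre ++ c :: t = (pre ++ [c]) ++ t by simp,
          PySem.List.index?_append_of_mem _ (by simp),
          PySem.List.index?_append_singleton_self pre c hcp]
      have hguard : pvStep cats b ((pre.length : Int), c)
          = pvMax b (c, (cats.count c : Int)) := by
        unfold pvStep pvMax
        rw [hidx]
        simp [PySem.List.count_eq]
      have hcm : c ∉ PySem.Set.ofList pre := fun h => hcp ((PySem.Set.mem_ofList pre c).mp h)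
      have hofl : PySem.Set.ofList (pre ++ [c]) = PySem.Set.ofList pre ++ [c] := by
        rw [PySem.Set.ofList_eq_foldl, List.foldl_append, ← PySem.Set.ofList_eq_foldl]
        exact PySem.Set.add_of_not_mem hcm
      have hpre' : cats = (pre ++ [c]) ++ t := by rw [hc, List.append_assoc]; rfl
      obtain ⟨r, hr⟩ : ∃ r, PySem.Set.ofList cats = (PySem.Set.ofList pre ++ [c]) ++ r := by
        have : PySem.Set.ofList cats = t.foldl PySem.Set.add (PySem.Set.ofList (pre ++ [c])) := by
          rw [hpre', PySem.Set.ofList_eq_foldl, List.foldl_append, ← PySem.Set.ofList_eq_foldl]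
        rw [this, hofl]; exact pv_foldl_add_prefix t _
      have hdrop : (PySem.Set.ofList cats).drop (PySem.Set.ofList pre).length = c :: r := by
        rw [hr]; simp
      have hdrop' : (PySem.Set.ofList cats).drop (PySem.Set.ofList (pre ++ [c])).length = r := by
        rw [hr, hofl]; simp
      have hih := ih (pre ++ [c]) (b := pvMax b (c, (cats.count c : Int))) hpre'
      rw [hdrop'] at hih
      simp only [List.length_append, List.length_cons, List.length_nil] at hih
      push_cast at hih
      rw [hguard, hdrop]
      simp only [List.map_cons, List.foldl_cons]
      exact hih

def pvMaxStep (m : Option (Int × Int)) (kv : Int × Int) : Option (Int × Int) :=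
  match m with
  | none => some kv
  | some b => some (pvMax b kv)

theorem pv_head_insertBy (x : Int × Int) (l : List (Int × Int)) :
    (PySem.List.insertBy (fun a b => decide (b.2 < a.2)) x l).head? = pvMaxStep l.head? x := by
  cases l with
  | nil => rfl
  | cons y ys =>
    simp only [PySem.List.insertBy, pvMaxStep, pvMax, List.head?]
    by_cases h : y.2 < x.2 <;> simp [h]

theorem pv_head_sortFold (xs acc : List (Int × Int)) :
    (xs.foldl (fun a x => PySem.List.insertBy (fun a b => decide (b.2 < a.2)) x a) acc).head?
      = xs.foldl pvMaxStep acc.head? := by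
  induction xs generalizing acc with
  | nil => rfl
  | cons x t ih => simp only [List.foldl_cons, ih, pv_head_insertBy]

theorem pv_head_sorted (xs : List (Int × Int)) :
    (PySem.List.sorted xs (fun kv => kv.2) true).head? = xs.foldl pvMaxStep none := by
  have := pv_head_sortFold xs []
  simpa [PySem.List.sorted] using this

theorem pv_maxStep_some (t : List (Int × Int)) (b : Int × Int) :
    t.foldl pvMaxStep (some b) = some (t.foldl pvMax b) := by
  induction t generalizing b with
  | nil => rfl
  | cons x s ih => simp only [List.foldl_cons, pvMaxStep, ih]

-- per-image value computed by A = per-image value computed by B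
theorem pv_image_eq (anns : List (List (String × Int))) :
    (if anns.isEmpty then (-1 : Int)
     else
       let cnt := PySem.Dict.counter (anns.filterMap pvCat)
       if cnt.items.isEmpty then (-1 : Int)
       else ((PySem.List.sorted cnt.items (fun kv => kv.2) true).headD (0, 0)).1)
    = ((PySem.List.enumerate (anns.filterMap pvCat) 0).foldl
        (pvStep (anns.filterMap pvCat)) (-1, 0)).1 := by
  set cats := anns.filterMap pvCat with hcats
  have hB : (PySem.List.enumerate cats 0).foldl (pvStep cats) (-1, 0)
      = ((PySem.Dict.counter cats).items).foldl pvMax (-1, 0) := by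
    have := pv_enum_fold cats cats [] (-1, 0) (by simp)
    simpa [PySem.Dict.items_counter] using this
  rw [hB]
  by_cases he : anns.isEmpty
  · have : cats = [] := by
      rw [hcats]; cases anns with
      | nil => rfl
      | cons _ _ => simp [List.isEmpty] at he
    simp only [he, if_true, this]
    decide
  · simp only [he]
    cases hI : (PySem.Dict.counter cats).items with
    | nil => simp
    | cons h t =>
      have hmem : h ∈ (PySem.Dict.counter cats).items := by rw [hI]; exact List.mem_cons_self ..
      rw [PySem.Dict.items_counter] at hmem
      obtain ⟨k, hk, rfl⟩ := List.mem_map.mp hmem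
      have hkc : k ∈ cats := (PySem.Set.mem_ofList cats k).mp hk
      simp only [List.isEmpty_cons, if_false, Bool.false_eq_true]
      rw [List.headD_eq_head?_getD, pv_head_sorted]
      simp only [List.foldl_cons, pvMaxStep, pv_maxStep_some]
      simp [pvMax, hkc]

theorem pv_fold_eq (l : List (Int × List (List (String × Int)))) (r : PySem.Dict Int Int) :
    l.foldl
      (fun (result : PySem.Dict Int Int) (p : Int × List (List (String × Int))) =>
        if p.2.isEmpty then result.insert p.1 (-1)
        else
          let cnt := PySem.Dict.counter (p.2.filterMap pvCat)
          if cnt.items.isEmpty then result.insert p.1 (-1)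
          else result.insert p.1 (((PySem.List.sorted cnt.items (fun kv => kv.2) true).headD (0, 0)).1)) r
    = l.foldl
      (fun (result : PySem.Dict Int Int) (p : Int × List (List (String × Int))) =>
        let cats := p.2.filterMap pvCat
        let best := (PySem.List.enumerate cats 0).foldl
          (fun (b : Int × Int) (ic : Int × Int) =>
            if (PySem.List.index? cats ic.2).map (fun k => (k : Int)) == some ic.1 then
              let n : Int := (PySem.List.count cats ic.2 : Int)
              if b.2 < n then (ic.2, n) else b
            else b)
          (-1, 0)
        result.insert p.1 best.1) r := by
  induction l generalizing r with
  | nil => rfl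
  | cons p t ih =>
    simp only [List.foldl_cons]
    rw [← ih]
    congr 1
    have h := pv_image_eq p.2
    have hstep : (PySem.List.enumerate (p.2.filterMap pvCat) 0).foldl
        (fun (b : Int × Int) (ic : Int × Int) =>
          if (PySem.List.index? (p.2.filterMap pvCat) ic.2).map (fun k => (k : Int)) == some ic.1 then
            let n : Int := (PySem.List.count (p.2.filterMap pvCat) ic.2 : Int)
            if b.2 < n then (ic.2, n) else b
          else b) (-1, 0)
        = (PySem.List.enumerate (p.2.filterMap pvCat) 0).foldl
            (pvStep (p.2.filterMap pvCat)) (-1, 0) := rfl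
    by_cases h1 : p.2.isEmpty
    · simp only [h1, if_true] at h ⊢
      rw [hstep, ← h]
    · simp only [h1, Bool.false_eq_true, if_false] at h ⊢
      by_cases h2 : (PySem.Dict.counter (p.2.filterMap pvCat)).items.isEmpty
      · simp only [h2, if_true] at h ⊢
        rw [hstep, ← h]
      · simp only [h2, Bool.false_eq_true, if_false] at h ⊢
        rw [hstep, ← h]

-- ===== VERDICT (by name: the statement is the Claim_ definition above) =====
theorem image_primary_category_py_spec : Claim_equal_image_primary_category_py := by
  intro l _
  unfold Spec_image_primary_category_py image_primary_category_py image_primary_category_py_alt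
  rw [pv_fold_eq]
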